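-- pv_equiv track=rewrite | github.com/Mateyc45/Processamento-da-informacao | 7.8.py | somar_vizinhos_de_um
-- ===== SOURCE A (Python) =====
-- def somar_vizinhos_de_um(vetor):
--     soma = 0
--     for i in range(len(vetor)):
--         if vetor[i] == 1:
--             if i > 0:
--                 soma += vetor[i - 1]
--             if i < len(vetor) - 1:
--                 soma += vetor[i + 1]
--     return soma
-- ===== SOURCE B (Python) =====
-- def somar_vizinhos_de_um(vetor):
--     soma = 0
--     for i in range(len(vetor) - 1):
--         if vetor[i] == 1:
--             soma += vetor[i + 1]
--         if vetor[i + 1] == 1: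
--             soma += vetor[i]
--     return soma
-- ===== Notes on version B (the rewrite author's own statement) =====
-- stated objective: simpler
-- what changed: Traverses adjacent pairs (edges) once, adding each side's contribution, instead of scanning indices of ones and probing i-1/i+1 under explicit boundary guards; no boundary checks remain.
import Mathlib
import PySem

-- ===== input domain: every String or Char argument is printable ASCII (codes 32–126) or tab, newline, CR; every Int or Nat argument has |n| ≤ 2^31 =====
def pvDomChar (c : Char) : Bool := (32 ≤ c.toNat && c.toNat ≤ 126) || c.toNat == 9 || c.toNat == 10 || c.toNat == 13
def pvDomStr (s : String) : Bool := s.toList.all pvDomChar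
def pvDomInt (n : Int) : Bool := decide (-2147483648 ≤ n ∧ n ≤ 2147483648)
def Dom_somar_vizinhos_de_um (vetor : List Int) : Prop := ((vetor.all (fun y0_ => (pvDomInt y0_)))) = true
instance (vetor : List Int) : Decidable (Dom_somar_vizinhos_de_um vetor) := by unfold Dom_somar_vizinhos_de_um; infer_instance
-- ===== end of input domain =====

-- B replaces A's "find each 1, probe i-1/i+1 under boundary guards" scan by a single
-- guard-free traversal of adjacent pairs; same O(n) cost, simpler code.

-- ===== PORT A =====
def somar_vizinhos_de_um (vetor : List Int) : Int :=
  (PySem.List.pyRange 0 (vetor.length : Int) 1).foldl (fun soma i =>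
    if PySem.List.pyGetD vetor i 0 = 1 then
      let soma := if 0 < i then soma + PySem.List.pyGetD vetor (i - 1) 0 else soma
      let soma := if i < (vetor.length : Int) - 1 then soma + PySem.List.pyGetD vetor (i + 1) 0 else soma
      soma
    else soma) 0

-- ===== PORT B =====
def somar_vizinhos_de_um_alt (vetor : List Int) : Int :=
  (PySem.List.pyRange 0 ((vetor.length : Int) - 1) 1).foldl (fun soma i =>
    let soma := if PySem.List.pyGetD vetor i 0 = 1 then soma + PySem.List.pyGetD vetor (i + 1) 0 else soma
    let soma := if PySem.List.pyGetD vetor (i + 1) 0 = 1 then soma + PySem.List.pyGetD vetor i 0 else soma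
    soma) 0

-- ===== PRECONDITION & SPEC =====
def Spec_somar_vizinhos_de_um (vetor : List Int) (out : Int) : Prop := out = somar_vizinhos_de_um_alt vetor
instance (vetor : List Int) (out : Int) : Decidable (Spec_somar_vizinhos_de_um vetor out) := by unfold Spec_somar_vizinhos_de_um; infer_instance

-- ===== CLAIM (what is proved, stated in full; the proofs are below) =====
def Claim_equal_somar_vizinhos_de_um : Prop := ∀ (vetor : List Int), Dom_somar_vizinhos_de_um vetor → Spec_somar_vizinhos_de_um vetor (somar_vizinhos_de_um vetor)

-- ===== LEMMAS AND PROOFS =====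

-- per-index contribution of A's loop body
def gA (v : List Int) (k : Nat) : Int :=
  if v.getD k 0 = 1 then
    (if 0 < k then v.getD (k - 1) 0 else 0) + (if (k : Int) < (v.length : Int) - 1 then v.getD (k + 1) 0 else 0)
  else 0

-- per-edge contribution of B's loop body
def gB (v : List Int) (k : Nat) : Int :=
  (if v.getD k 0 = 1 then v.getD (k + 1) 0 else 0) + (if v.getD (k + 1) 0 = 1 then v.getD k 0 else 0)

theorem A_eq_sum (v : List Int) :
    somar_vizinhos_de_um v = ∑ k ∈ Finset.range v.length, gA v k := by
  unfold somar_vizinhos_de_um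
  rw [PySem.List.pyRange_zero_natCast, List.foldl_map]
  refine Eq.trans (List.foldl_ext _ (fun acc k => acc + gA v k) 0 ?_) ?_
  · intro acc k _
    simp only [gA, PySem.List.pyGetD_natCast]
    rcases Nat.eq_zero_or_pos k with h1 | h1
    · subst h1
      simp only [Nat.cast_zero, show ((0:Int) + 1) = ((1:Nat):Int) by norm_num,
        PySem.List.pyGetD_natCast]
      split_ifs <;> first | (exfalso; omega) | ring
    · have e1 : ((k : Int) - 1) = ((k - 1 : Nat) : Int) := by push_cast [h1]; omega
      have e2 : ((k : Int) + 1) = ((k + 1 : Nat) : Int) := by push_cast; ring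
      rw [e1, e2]
      simp only [PySem.List.pyGetD_natCast]
      split_ifs <;> first | (exfalso; omega) | ring
  · rw [PySem.List.foldl_add (List.range v.length) (fun k => gA v k) 0, zero_add]
    rfl

theorem B_eq_sum (v : List Int) :
    somar_vizinhos_de_um_alt v = ∑ k ∈ Finset.range (v.length - 1), gB v k := by
  unfold somar_vizinhos_de_um_alt
  rcases v with _ | ⟨x, xs⟩
  · simp [PySem.List.pyRange]
  · have hlen : (((x :: xs).length : Int) - 1) = ((xs.length : Nat) : Int) := by
      push_cast [List.length_cons]; ring
    rw [hlen, PySem.List.pyRange_zero_natCast, List.foldl_map]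
    refine Eq.trans (List.foldl_ext _ (fun acc k => acc + gB (x :: xs) k) 0 ?_) ?_
    · intro acc k _
      simp only [gB]
      have e2 : ((k : Int) + 1) = ((k + 1 : Nat) : Int) := by push_cast; ring
      rw [e2]
      simp only [PySem.List.pyGetD_natCast]
      split_ifs <;> ring
    · rw [PySem.List.foldl_add (List.range xs.length) (fun k => gB (x :: xs) k) 0, zero_add]
      have hl : (x :: xs).length - 1 = xs.length := by omega
      rw [hl]
      rfl

theorem sum_gA_eq_sum_gB (v : List Int) :
    ∑ k ∈ Finset.range v.length, gA v k = ∑ k ∈ Finset.range (v.length - 1), gB v k := by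
  rcases Nat.eq_zero_or_pos v.length with h0 | h0
  · simp [h0]
  · obtain ⟨m, hm⟩ : ∃ m, v.length = m + 1 := ⟨v.length - 1, by omega⟩
    rw [hm]
    have hsplit : ∀ k, gA v k =
        (if 0 < k ∧ v.getD k 0 = 1 then v.getD (k - 1) 0 else 0) +
        (if (k : Int) < (v.length : Int) - 1 ∧ v.getD k 0 = 1 then v.getD (k + 1) 0 else 0) := by
      intro k; unfold gA; split_ifs <;> first | rfl | tauto
    simp only [hsplit]
    rw [Finset.sum_add_distrib]
    rw [Finset.sum_range_succ' (fun k => if 0 < k ∧ v.getD k 0 = 1 then v.getD (k - 1) 0 else 0) m]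
    rw [Finset.sum_range_succ (fun k => if (k : Int) < (v.length : Int) - 1 ∧ v.getD k 0 = 1 then v.getD (k + 1) 0 else 0) m]
    have hL : ∀ k, (if 0 < k + 1 ∧ v.getD (k + 1) 0 = 1 then v.getD (k + 1 - 1) 0 else 0)
        = (if v.getD (k + 1) 0 = 1 then v.getD k 0 else 0) := by
      intro k; simp
    have hR0 : (if ((m : Int)) < (v.length : Int) - 1 ∧ v.getD m 0 = 1 then v.getD (m + 1) 0 else 0) = 0 := by
      have h : ¬ ((m : Int) < (v.length : Int) - 1) := by rw [hm]; push_cast; omega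
      simp [h]
    have hRk : ∀ k ∈ Finset.range m,
        (if ((k : Int)) < (v.length : Int) - 1 ∧ v.getD k 0 = 1 then v.getD (k + 1) 0 else 0)
        = (if v.getD k 0 = 1 then v.getD (k + 1) 0 else 0) := by
      intro k hk
      have hk' : k < m := Finset.mem_range.mp hk
      have h : ((k : Int)) < (v.length : Int) - 1 := by rw [hm]; push_cast; omega
      simp [h]
    rw [Finset.sum_congr rfl hRk, hR0]
    simp only [hL]
    have hms : (m + 1) - 1 = m := by omega
    rw [hms]
    unfold gB
    rw [Finset.sum_add_distrib]
    have hz : (if 0 < 0 ∧ v.getD 0 0 = 1 then v.getD 0 0 else 0) = 0 := by norm_num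
    rw [hz]
    ring

-- ===== VERDICT (by name: the statement is the Claim_ definition above) =====
theorem somar_vizinhos_de_um_spec : Claim_equal_somar_vizinhos_de_um := by
  intro vetor _
  unfold Spec_somar_vizinhos_de_um
  rw [A_eq_sum, B_eq_sum, sum_gA_eq_sum_gB]
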